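-- pv_equiv track=rewrite | github.com/all-day-and-night/algorithms | programmers/visitLength.py | solution
-- ===== SOURCE A (Python) =====
-- def solution(dirs):
--     answer = 0
--     temp = set()
--     dir_ = {'U': (1, 0), 'R': (0, 1), 'D': (-1, 0), 'L': (0, -1)}
--     x, y = 0, 0
--     for d in dirs:
--         nx, ny = x + dir_[d][0], y + dir_[d][1]
--         if -5 <= nx <= 5 and -5 <= ny <= 5:
--             temp.add((x, y, nx, ny))
--             temp.add((nx, ny, x, y))
--             x, y = nx, ny
--
--     return len(temp) // 2
-- ===== SOURCE B (Python) =====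
-- def solution(dirs):
--     dir_ = {'U': (1, 0), 'R': (0, 1), 'D': (-1, 0), 'L': (0, -1)}
--     # phase 1: build the list of visited cells (stay put on out-of-bounds moves)
--     path = [(0, 0)]
--     for d in dirs:
--         dx, dy = dir_[d]
--         x, y = path[-1]
--         nx, ny = x + dx, y + dy
--         if -5 <= nx <= 5 and -5 <= ny <= 5:
--             path.append((nx, ny))
--     # phase 2: count distinct undirected edges between consecutive cells
--     edges = set()
--     for p, q in zip(path, path[1:]):
--         edges.add((p, q) if p <= q else (q, p))
--     return len(edges)
-- ===== Notes on version B (the rewrite author's own statement) =====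
-- stated objective: alternative
-- what changed: B splits A's single annotated walk into two phases: first it builds the list of visited cells (staying put on out-of-bounds moves), then a separate pass over consecutive pairs collects each step as one canonical sorted-tuple undirected edge into a set and returns its size, instead of A's set of both orientations halved by //2.
import Mathlib
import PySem

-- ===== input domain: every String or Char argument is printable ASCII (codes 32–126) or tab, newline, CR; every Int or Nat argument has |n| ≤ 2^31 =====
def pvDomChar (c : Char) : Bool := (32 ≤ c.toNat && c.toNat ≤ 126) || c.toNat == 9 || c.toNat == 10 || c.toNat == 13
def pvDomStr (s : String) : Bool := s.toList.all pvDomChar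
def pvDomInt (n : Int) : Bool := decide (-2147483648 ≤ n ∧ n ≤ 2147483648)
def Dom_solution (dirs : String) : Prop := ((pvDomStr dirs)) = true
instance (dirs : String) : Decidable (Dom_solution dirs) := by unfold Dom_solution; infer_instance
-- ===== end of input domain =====

-- B replaces A's single annotated walk (a set of both edge orientations, halved at the end)
-- by two phases: build the visited-cell path list, then a separate pass collecting one
-- canonical undirected edge per consecutive pair into a set (objective: alternative).

-- ===== PORT A =====
def dirDict : PySem.Dict Char (Int × Int) :=
  PySem.Dict.ofList [('U', (1, 0)), ('R', (0, 1)), ('D', (-1, 0)), ('L', (0, -1))]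

def solutionStep (st : PySem.Set (Int × Int × Int × Int) × Int × Int) (d : Char) :
    PySem.Set (Int × Int × Int × Int) × Int × Int :=
  match dirDict.get? d with
  | none => st   -- Python raises KeyError here; excluded by Pre_solution
  | some dv =>
    let nx := st.2.1 + dv.1
    let ny := st.2.2 + dv.2
    if -5 ≤ nx ∧ nx ≤ 5 ∧ -5 ≤ ny ∧ ny ≤ 5 then
      (PySem.Set.add (PySem.Set.add st.1 (st.2.1, st.2.2, nx, ny)) (nx, ny, st.2.1, st.2.2),
       nx, ny)
    else st

def solution (dirs : String) : Int :=
  let st := dirs.toList.foldl solutionStep (PySem.Set.empty, 0, 0)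
  PySem.Int.floordiv (PySem.Set.len st.1) 2

-- ===== PORT B =====
def dirDictB : PySem.Dict Char (Int × Int) :=
  PySem.Dict.ofList [('U', (1, 0)), ('R', (0, 1)), ('D', (-1, 0)), ('L', (0, -1))]

def buildStep (path : List (Int × Int)) (d : Char) : List (Int × Int) :=
  match dirDictB.get? d with
  | none => path   -- Python raises KeyError here; excluded by Pre_solution
  | some dv =>
    match PySem.List.pyGet? path (-1) with   -- path[-1]; path is never empty
    | none => path
    | some p =>
      let nx := p.1 + dv.1
      let ny := p.2 + dv.2
      if -5 ≤ nx ∧ nx ≤ 5 ∧ -5 ≤ ny ∧ ny ≤ 5 then path ++ [(nx, ny)] else path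

def canonEdge (p q : Int × Int) : (Int × Int) × (Int × Int) :=
  if p.1 < q.1 ∨ (p.1 = q.1 ∧ p.2 ≤ q.2) then (p, q) else (q, p)

def solution_alt (dirs : String) : Int :=
  let path := dirs.toList.foldl buildStep [((0 : Int), (0 : Int))]
  let edges := (path.zip (PySem.List.slice path (some 1) none)).foldl
      (fun s pq => PySem.Set.add s (canonEdge pq.1 pq.2)) PySem.Set.empty
  PySem.Set.len edges

-- ===== PRECONDITION & SPEC =====
-- Pre_ excludes exactly the strings containing a character other than U, R, D or L, on which Python A raises KeyError (and B does too).
def Pre_solution (dirs : String) : Prop :=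
  dirs.toList.all (fun c => c == 'U' || c == 'R' || c == 'D' || c == 'L') = true
instance (dirs : String) : Decidable (Pre_solution dirs) := by unfold Pre_solution; infer_instance
def pvWitness_solution : String := "UR"

def Spec_solution (dirs : String) (out : Int) : Prop := out = solution_alt dirs
instance (dirs : String) (out : Int) : Decidable (Spec_solution dirs out) := by unfold Spec_solution; infer_instance

-- ===== CLAIM (what is proved, stated in full; the proofs are below) =====
def Claim_equal_solution : Prop := ∀ (dirs : String), Dom_solution dirs → Pre_solution dirs → Spec_solution dirs (solution dirs)

-- ===== LEMMAS AND PROOFS =====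

-- the edge set B's second pass computes over a given path
def edgeSet (path : List (Int × Int)) : PySem.Set ((Int × Int) × (Int × Int)) :=
  (path.zip path.tail).foldl (fun s pq => PySem.Set.add s (canonEdge pq.1 pq.2)) PySem.Set.empty

theorem canon_comm (p q : Int × Int) : canonEdge p q = canonEdge q p := by
  rcases p with ⟨a, b⟩; rcases q with ⟨c, d⟩
  simp only [canonEdge]
  split_ifs with h1 h2 h2 <;> simp_all [Prod.ext_iff] <;> omega

theorem canon_eq_iff (p q p' q' : Int × Int) :
    canonEdge p q = canonEdge p' q' ↔ (p = p' ∧ q = q') ∨ (p = q' ∧ q = p') := by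
  rcases p with ⟨a, b⟩; rcases q with ⟨c, d⟩; rcases p' with ⟨e, f⟩; rcases q' with ⟨g, h⟩
  simp only [canonEdge, Prod.mk.injEq]
  split_ifs with h1 h2 h2 <;> simp only [Prod.mk.injEq] <;> constructor <;> intro hx <;> omega

theorem set_add_of_mem {α : Type} [BEq α] [LawfulBEq α] (s : PySem.Set α) (x : α)
    (h : x ∈ s) : PySem.Set.add s x = s := by
  simp [PySem.Set.add, PySem.Set.contains, h]

theorem set_add_of_not_mem {α : Type} [BEq α] [LawfulBEq α] (s : PySem.Set α) (x : α)
    (h : ¬ x ∈ s) : PySem.Set.add s x = s ++ [x] := by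
  simp [PySem.Set.add, PySem.Set.contains, h]

theorem zip_tail_append (l : List (Int × Int)) (n : Int × Int) (h : l ≠ []) :
    (l ++ [n]).zip ((l ++ [n]).tail) = l.zip l.tail ++ [(l.getLast h, n)] := by
  induction l with
  | nil => exact absurd rfl h
  | cons a t ih =>
    cases t with
    | nil => simp
    | cons b t' =>
      have := ih (by simp)
      simp only [List.cons_append, List.zip_cons_cons, List.tail_cons] at this ⊢
      rw [List.getLast_cons (by simp)]
      simp [this]

theorem edgeSet_append (l : List (Int × Int)) (n : Int × Int) (h : l ≠ []) :
    edgeSet (l ++ [n]) = PySem.Set.add (edgeSet l) (canonEdge (l.getLast h) n) := by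
  unfold edgeSet
  rw [zip_tail_append l n h, List.foldl_append]
  rfl

theorem dirDict_some (ch : Char) (dv : Int × Int) (h : dirDict.get? ch = some dv) :
    dv = (1, 0) ∨ dv = (0, 1) ∨ dv = (-1, 0) ∨ dv = (0, -1) := by
  simp only [dirDict, PySem.Dict.ofList, PySem.Dict.update, List.foldl,
    PySem.Dict.get?_insert] at h
  split_ifs at h <;> simp_all [PySem.Dict.get?, PySem.Dict.empty]

-- the walk invariant: A's state vs B's path and its canonical edge set
def WalkInv (st : PySem.Set (Int × Int × Int × Int) × Int × Int)
    (path : List (Int × Int)) : Prop :=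
  ∃ h : path ≠ [],
    st.2 = path.getLast h ∧
    (∀ p q : Int × Int, (p.1, p.2, q.1, q.2) ∈ st.1 ↔ canonEdge p q ∈ edgeSet path) ∧
    st.1.length = 2 * (edgeSet path).length

theorem walk_step (st : PySem.Set (Int × Int × Int × Int) × Int × Int)
    (path : List (Int × Int)) (ch : Char) (hI : WalkInv st path) :
    WalkInv (solutionStep st ch) (buildStep path ch) := by
  obtain ⟨h, hpos, hmem, hlen⟩ := hI
  rcases hget : dirDict.get? ch with _ | dv <;>
    have hgetB : dirDictB.get? ch = dirDict.get? ch := rfl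
  · simp only [solutionStep, buildStep, hget, hgetB]
    exact ⟨h, hpos, hmem, hlen⟩
  · simp only [solutionStep, buildStep, hget, hgetB, PySem.List.pyGet?_neg_one,
      List.getLast?_eq_some_getLast h]
    rw [hpos]
    set pold := path.getLast h with hpold
    by_cases hb : -5 ≤ pold.1 + dv.1 ∧ pold.1 + dv.1 ≤ 5 ∧ -5 ≤ pold.2 + dv.2 ∧ pold.2 + dv.2 ≤ 5
    · simp only [if_pos hb]
      set pnew : Int × Int := (pold.1 + dv.1, pold.2 + dv.2) with hpnew
      have hne : pold ≠ pnew := by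
        rcases dirDict_some ch dv hget with h4 | h4 | h4 | h4 <;>
          · intro hc
            rw [Prod.ext_iff] at hc
            simp only [hpnew, h4] at hc
            simp at hc
      have hnil : path ++ [pnew] ≠ [] := by simp
      have hlast' : (path ++ [pnew]).getLast hnil = pnew := by simp
      have hE : edgeSet (path ++ [pnew]) =
          PySem.Set.add (edgeSet path) (canonEdge pold pnew) := edgeSet_append path pnew h
      have hflat : ((pold.1, pold.2, pnew.1, pnew.2) : Int × Int × Int × Int) ≠
          (pnew.1, pnew.2, pold.1, pold.2) := by
        intro hc
        simp only [Prod.mk.injEq] at hc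
        exact hne (Prod.ext hc.1 hc.2.1)
      by_cases he : canonEdge pold pnew ∈ edgeSet path
      · -- the edge was already walked: nothing changes on either side
        have ht1 : ((pold.1, pold.2, pnew.1, pnew.2) : Int × Int × Int × Int) ∈ st.1 :=
          (hmem pold pnew).2 he
        have ht2 : ((pnew.1, pnew.2, pold.1, pold.2) : Int × Int × Int × Int) ∈ st.1 :=
          (hmem pnew pold).2 (by rwa [canon_comm])
        rw [set_add_of_mem _ _ ht1, set_add_of_mem _ _ ht2]
        refine ⟨hnil, hlast'.symm, ?_, ?_⟩
        · intro p q
          rw [hE, set_add_of_mem _ _ he]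
          exact hmem p q
        · rw [hE, set_add_of_mem _ _ he]
          exact hlen
      · -- a new edge: A's set grows by the two orientations, B's by one canonical edge
        have ht1 : ((pold.1, pold.2, pnew.1, pnew.2) : Int × Int × Int × Int) ∉ st.1 :=
          fun hc => he ((hmem pold pnew).1 hc)
        have ht2 : ((pnew.1, pnew.2, pold.1, pold.2) : Int × Int × Int × Int) ∉ st.1 :=
          fun hc => he (by rw [canon_comm]; exact (hmem pnew pold).1 hc)
        rw [set_add_of_not_mem _ _ ht1,
          set_add_of_not_mem _ _ (by
            simp only [List.mem_append, List.mem_singleton]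
            rintro (hc | hc)
            · exact ht2 hc
            · exact hflat hc.symm)]
        refine ⟨hnil, hlast'.symm, ?_, ?_⟩
        · intro p q
          rw [hE, set_add_of_not_mem _ _ he]
          simp only [List.mem_append, List.mem_singleton]
          rw [hmem p q, canon_eq_iff]
          constructor
          · rintro ((hc | hc) | hc)
            · exact Or.inl hc
            · refine Or.inr (Or.inl ?_)
              simp only [Prod.mk.injEq] at hc
              exact ⟨Prod.ext hc.1 hc.2.1, Prod.ext hc.2.2.1 hc.2.2.2⟩
            · refine Or.inr (Or.inr ?_)
              simp only [Prod.mk.injEq] at hc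
              exact ⟨Prod.ext hc.1 hc.2.1, Prod.ext hc.2.2.1 hc.2.2.2⟩
          · rintro (hc | ⟨h1, h2⟩ | ⟨h1, h2⟩)
            · exact Or.inl (Or.inl hc)
            · subst h1; subst h2; exact Or.inl (Or.inr rfl)
            · subst h1; subst h2; exact Or.inr rfl
        · rw [hE, set_add_of_not_mem _ _ he]
          simp only [List.length_append, List.length_singleton]
          omega
    · simp only [if_neg hb]
      exact ⟨h, hpos, hmem, hlen⟩

theorem walk_invariant (ds : List Char) :
    WalkInv (ds.foldl solutionStep (PySem.Set.empty, 0, 0))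
      (ds.foldl buildStep [((0 : Int), (0 : Int))]) := by
  induction ds using List.reverseRecOn with
  | nil =>
    refine ⟨by simp, ?_, ?_, ?_⟩ <;> simp [edgeSet, PySem.Set.empty, List.foldl]
  | append_singleton l ch ih =>
    rw [List.foldl_append, List.foldl_append]
    exact walk_step _ _ ch ih

-- ===== VERDICT (by name: the statement is the Claim_ definition above) =====
theorem solution_spec : Claim_equal_solution := by
  intro dirs _ _
  unfold Spec_solution solution solution_alt
  obtain ⟨h, -, -, hlen⟩ := walk_invariant dirs.toList
  show PySem.Int.floordiv
      (PySem.Set.len (dirs.toList.foldl solutionStep (PySem.Set.empty, 0, 0)).1) 2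
      = PySem.Set.len ((dirs.toList.foldl buildStep [((0 : Int), (0 : Int))]).zip
          (PySem.List.slice (dirs.toList.foldl buildStep [((0 : Int), (0 : Int))]) (some 1) none)
        |>.foldl (fun s pq => PySem.Set.add s (canonEdge pq.1 pq.2)) PySem.Set.empty)
  rw [PySem.List.slice_from_one]
  have hE : ((dirs.toList.foldl buildStep [((0 : Int), (0 : Int))]).zip
      (dirs.toList.foldl buildStep [((0 : Int), (0 : Int))]).tail |>.foldl
      (fun s pq => PySem.Set.add s (canonEdge pq.1 pq.2)) PySem.Set.empty)
      = edgeSet (dirs.toList.foldl buildStep [((0 : Int), (0 : Int))]) := rfl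
  rw [hE]
  simp only [PySem.Set.len, hlen]
  rw [PySem.Int.floordiv_eq_ediv_of_pos (by omega)]
  push_cast
  omega
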